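-- pv_equiv track=rewrite | github.com/fhnaumann/CodenamesBot | api-server/database.py | get_all_combinations
-- ===== SOURCE A (Python) =====
-- def get_all_combinations(players):
--     """Generate all possible combinations of players (2+)"""
--     from itertools import combinations
--
--     # Sort players to ensure consistent ordering
--     players = sorted(players)
--
--     combos = []
--     # Generate combinations of size 2 to len(players)
--     for r in range(2, len(players) + 1):
--         for combo in combinations(players, r):
--             combos.append(','.join(sorted(combo)))
--
--     return combos
-- ===== SOURCE B (Python) =====
-- def get_all_combinations(players):
--     """Generate all possible combinations of players (2+)"""
--     ps = sorted(players)
--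
--     def build(rest, need, chosen):
--         # all size-`need` extensions of `chosen` using elements of `rest`,
--         # in index-lexicographic order, already joined
--         if need == 0:
--             return [','.join(chosen)]
--         if not rest:
--             return []
--         head, tail = rest[0], rest[1:]
--         return build(tail, need - 1, chosen + [head]) + build(tail, need, chosen)
--
--     out = []
--     for r in range(2, len(ps) + 1):
--         out.extend(build(ps, r, []))
--     return out
-- ===== Notes on version B (the rewrite author's own statement) =====
-- stated objective: alternative
-- what changed: B replaces the itertools.combinations iterator and the redundant per-combination re-sort with a hand-written structural recursion that builds each joined combination directly from the already-sorted list, extending an output list once per size.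
import Mathlib
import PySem

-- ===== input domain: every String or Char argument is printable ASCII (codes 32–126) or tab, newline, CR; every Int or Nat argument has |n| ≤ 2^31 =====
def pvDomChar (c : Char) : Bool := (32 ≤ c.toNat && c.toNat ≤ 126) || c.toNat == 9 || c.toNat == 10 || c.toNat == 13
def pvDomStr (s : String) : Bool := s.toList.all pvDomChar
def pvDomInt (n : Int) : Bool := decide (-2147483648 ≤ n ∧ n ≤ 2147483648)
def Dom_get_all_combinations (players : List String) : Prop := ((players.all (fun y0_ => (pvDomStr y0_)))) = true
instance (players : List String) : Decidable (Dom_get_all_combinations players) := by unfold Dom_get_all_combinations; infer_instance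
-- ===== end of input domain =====

-- B replaces the itertools.combinations iterator and the per-combination re-sort with a
-- structural recursion building each joined combination directly (alternative decomposition, same cost).

-- ===== PORT A =====
def get_all_combinations (players : List String) : List String :=
  let players := PySem.List.sorted players (fun x => x) false
  (PySem.List.pyRange 2 ((players.length : Int) + 1) 1).foldl (fun combos r =>
    (PySem.List.combinations players r.toNat).foldl (fun combos combo =>
      combos ++ [PySem.Str.join "," (PySem.List.sorted combo (fun x => x) false)]) combos) []

-- ===== PORT B =====
def pvBuild : List String → Nat → List String → List String
  | _, 0, chosen => [PySem.Str.join "," chosen]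
  | [], _ + 1, _ => []
  | head :: tail, need + 1, chosen =>
      pvBuild tail need (chosen ++ [head]) ++ pvBuild tail (need + 1) chosen

def get_all_combinations_alt (players : List String) : List String :=
  let ps := PySem.List.sorted players (fun x => x) false
  (PySem.List.pyRange 2 ((ps.length : Int) + 1) 1).foldl (fun out r =>
    out ++ pvBuild ps r.toNat []) []

-- ===== PRECONDITION & SPEC =====
def Spec_get_all_combinations (players : List String) (out : List String) : Prop := out = get_all_combinations_alt players
instance (players : List String) (out : List String) : Decidable (Spec_get_all_combinations players out) := by unfold Spec_get_all_combinations; infer_instance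

-- ===== CLAIM (what is proved, stated in full; the proofs are below) =====
def Claim_equal_get_all_combinations : Prop := ∀ (players : List String), Dom_get_all_combinations players → Spec_get_all_combinations players (get_all_combinations players)

-- ===== LEMMAS AND PROOFS =====

-- B's recursion is the map of the join over itertools-ordered combinations.
theorem pvBuild_eq (rest : List String) (need : Nat) (chosen : List String) :
    pvBuild rest need chosen
      = (PySem.List.combinations rest need).map
          (fun c => PySem.Str.join "," (chosen ++ c)) := by
  induction rest generalizing need chosen with
  | nil =>
      cases need with
      | zero => simp [pvBuild, PySem.List.combinations_zero]
      | succ n => simp [pvBuild, PySem.List.combinations_nil_succ]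
  | cons h t ih =>
      cases need with
      | zero => simp [pvBuild, PySem.List.combinations_zero]
      | succ n =>
          rw [pvBuild, PySem.List.combinations_cons_succ]
          rw [ih n (chosen ++ [h]), ih (n + 1) chosen]
          simp [Function.comp_def]

-- members of combinations of a sorted list are already sorted
theorem pv_sorted_combo (ps : List String) (hps : ps.Pairwise (fun a b => a ≤ b))
    {r : Nat} {c : List String} (hc : c ∈ PySem.List.combinations ps r) :
    PySem.List.sorted c (fun x => x) false = c := by
  apply PySem.List.sorted_eq_self_of_pairwise
  exact List.Pairwise.sublist (PySem.List.sublist_of_mem_combinations hc) hps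

-- ===== VERDICT (by name: the statement is the Claim_ definition above) =====

theorem get_all_combinations_spec : Claim_equal_get_all_combinations := by
  intro players _
  unfold Spec_get_all_combinations get_all_combinations get_all_combinations_alt
  set ps := PySem.List.sorted players (fun x => x) false with hps
  have hpair : ps.Pairwise (fun a b => a ≤ b) := PySem.List.sorted_pairwise players _
  have hstep : ∀ (combos : List String) (r : Int),
      (PySem.List.combinations ps r.toNat).foldl (fun combos combo =>
        combos ++ [PySem.Str.join "," (PySem.List.sorted combo (fun x => x) false)]) combos
      = combos ++ pvBuild ps r.toNat [] := by
    intro combos r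
    rw [PySem.List.foldl_append_singleton_eq_map, pvBuild_eq]
    congr 1
    apply List.map_congr_left
    intro c hc
    rw [pv_sorted_combo ps hpair hc]
    simp
  have : (fun (combos : List String) (r : Int) =>
      (PySem.List.combinations ps r.toNat).foldl (fun combos combo =>
        combos ++ [PySem.Str.join "," (PySem.List.sorted combo (fun x => x) false)]) combos)
      = (fun (out : List String) (r : Int) => out ++ pvBuild ps r.toNat []) := by
    funext combos r; exact hstep combos r
  simp only [this]
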